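-- pv_equiv track=rewrite | github.com/DCX-dev/Order-of-the-stone | Order of the stone/world_generator.py | _can_place_fortress
-- ===== SOURCE A (Python) =====
-- from typing import Dict, Any, List, Optional
--
-- def _can_place_fortress(x: int, surface_y: int, blocks: Dict[str, str]) -> bool:
--     """Check if fortress can be placed at location"""
--     # Check for space for fortress (5x6 base)
--     # Only check for non-terrain blocks (structures, trees, etc.)
--     terrain_blocks = {"grass", "dirt", "stone", "bedrock"}
--
--     for dx in range(-3, 4):
--         for dy in range(0, 6):  # Check base area and walls
--             check_x, check_y = x + dx, surface_y + dy
--             block_type = blocks.get(f"{check_x},{check_y}")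
--             if block_type and block_type not in terrain_blocks:
--                 return False
--     return True
-- ===== SOURCE B (Python) =====
-- def _can_place_fortress(x: int, surface_y: int, blocks) -> bool:
--     terrain_blocks = {"grass", "dirt", "stone", "bedrock"}
--     region = {f"{x + dx},{surface_y + dy}" for dx in range(-3, 4) for dy in range(0, 6)}
--     return not any(v and v not in terrain_blocks and k in region
--                    for k, v in blocks.items())
-- ===== Notes on version B (the rewrite author's own statement) =====
-- stated objective: alternative
-- what changed: Instead of probing the dict with 42 constructed keys over the fixed 7x6 region, B builds the set of region key strings once and makes a single any-pass over blocks.items(), flagging any truthy non-terrain block whose key is in that set.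
import Mathlib
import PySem

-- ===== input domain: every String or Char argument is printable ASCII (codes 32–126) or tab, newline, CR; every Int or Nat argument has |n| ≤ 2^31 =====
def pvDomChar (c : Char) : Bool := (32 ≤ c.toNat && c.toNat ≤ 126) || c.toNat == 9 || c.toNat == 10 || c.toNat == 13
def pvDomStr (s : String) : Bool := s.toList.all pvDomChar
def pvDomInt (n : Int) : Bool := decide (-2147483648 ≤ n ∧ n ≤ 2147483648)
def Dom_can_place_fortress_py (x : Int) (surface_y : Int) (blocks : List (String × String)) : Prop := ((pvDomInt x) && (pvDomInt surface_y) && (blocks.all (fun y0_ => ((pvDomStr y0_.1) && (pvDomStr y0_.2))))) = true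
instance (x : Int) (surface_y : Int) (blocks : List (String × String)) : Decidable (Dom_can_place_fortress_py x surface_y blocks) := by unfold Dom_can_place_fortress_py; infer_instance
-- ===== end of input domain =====

-- B replaces A's 42 per-cell dict lookups over the fixed 7×6 grid by building the set of
-- region keys once and making a single pass over blocks.items() (alternative decomposition,
-- no speed claim; the return value is proved identical).

-- ===== PORT A =====
-- f"{a},{b}"
def pvKey (a b : Int) : String := PySem.Int.toStr a ++ "," ++ PySem.Int.toStr b

-- 'block_type and block_type not in terrain_blocks' on the result of .get (None ↦ falsy)
def pvBad (terrain : PySem.Set String) (o : Option String) : Bool :=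
  match o with
  | none => false
  | some s => (s != "") && !(PySem.Set.contains terrain s)

def can_place_fortress_py (x : Int) (surface_y : Int) (blocks : List (String × String)) : Bool :=
  let terrain : PySem.Set String := PySem.Set.ofList ["grass", "dirt", "stone", "bedrock"]
  let d := PySem.Dict.ofList blocks
  -- nested 'for dx … for dy …: if bad: return False' = short-circuit all/all; 'return True'
  (PySem.List.pyRange (-3) 4 1).all fun dx =>
    (PySem.List.pyRange 0 6 1).all fun dy =>
      !(pvBad terrain (d.get? (pvKey (x + dx) (surface_y + dy))))

-- ===== PORT B =====
def can_place_fortress_py_alt (x : Int) (surface_y : Int) (blocks : List (String × String)) : Bool :=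
  let terrain : PySem.Set String := PySem.Set.ofList ["grass", "dirt", "stone", "bedrock"]
  -- region = {f"{x+dx},{surface_y+dy}" for dx in range(-3,4) for dy in range(0,6)}
  let region : PySem.Set String :=
    PySem.Set.ofList ((PySem.List.pyRange (-3) 4 1).flatMap fun dx =>
      (PySem.List.pyRange 0 6 1).map fun dy => pvKey (x + dx) (surface_y + dy))
  -- not any(v and v not in terrain_blocks and k in region for k, v in blocks.items())
  !((PySem.Dict.ofList blocks).items.any fun kv =>
      (kv.2 != "") && !(PySem.Set.contains terrain kv.2) && PySem.Set.contains region kv.1)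

-- ===== PRECONDITION & SPEC =====
def Spec_can_place_fortress_py (x : Int) (surface_y : Int) (blocks : List (String × String)) (out : Bool) : Prop := out = can_place_fortress_py_alt x surface_y blocks
instance (x : Int) (surface_y : Int) (blocks : List (String × String)) (out : Bool) : Decidable (Spec_can_place_fortress_py x surface_y blocks out) := by unfold Spec_can_place_fortress_py; infer_instance

-- ===== CLAIM (what is proved, stated in full; the proofs are below) =====
def Claim_equal_can_place_fortress_py : Prop := ∀ (x : Int) (surface_y : Int) (blocks : List (String × String)), Dom_can_place_fortress_py x surface_y blocks → Spec_can_place_fortress_py x surface_y blocks (can_place_fortress_py x surface_y blocks)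

-- ===== LEMMAS AND PROOFS =====

theorem can_place_fortress_py_eq_alt (x surface_y : Int) (blocks : List (String × String)) :
    can_place_fortress_py x surface_y blocks = can_place_fortress_py_alt x surface_y blocks := by
  unfold can_place_fortress_py can_place_fortress_py_alt
  set T : PySem.Set String := PySem.Set.ofList ["grass", "dirt", "stone", "bedrock"] with hT
  set d := PySem.Dict.ofList blocks with hd
  have hnd : d.keys.Nodup := PySem.Dict.nodup_keys_ofList blocks
  rw [Bool.eq_iff_iff]
  simp only [List.all_eq_true, Bool.not_eq_true', List.any_eq_false]
  constructor
  · -- every region cell clear ⇒ no flagged item lies in the region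
    intro h kv hkv hbad
    rw [Bool.and_eq_true, Bool.and_eq_true] at hbad
    obtain ⟨⟨h1, h2⟩, h3⟩ := hbad
    have hk1 : kv.1 ∈ ((PySem.List.pyRange (-3) 4 1).flatMap fun dx =>
        (PySem.List.pyRange 0 6 1).map fun dy => pvKey (x + dx) (surface_y + dy)) := by
      have := (PySem.Set.contains_iff _ _).mp h3
      simpa [PySem.Set.mem_ofList] using this
    rcases List.mem_flatMap.mp hk1 with ⟨dx, hdx, hk2⟩
    rcases List.mem_map.mp hk2 with ⟨dy, hdy, hkey⟩
    have hget : d.get? kv.1 = some kv.2 := by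
      have hm : (kv.1, kv.2) ∈ d.items := by simpa using hkv
      exact PySem.Dict.get?_of_mem_items d hm hnd
    have hok := h dx hdx dy hdy
    rw [hkey, hget] at hok
    simp only [pvBad] at hok
    rw [h1, h2] at hok
    simp at hok
  · -- no flagged item in the region ⇒ every region cell clear
    intro h dx hdx dy hdy
    cases hget : d.get? (pvKey (x + dx) (surface_y + dy)) with
    | none => simp [pvBad]
    | some v =>
      simp only [pvBad]
      have hmem : (pvKey (x + dx) (surface_y + dy), v) ∈ d.items :=
        PySem.Dict.mem_items_of_get?_eq_some d hget
      have hno := h _ hmem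
      have hreg : PySem.Set.contains
          (PySem.Set.ofList ((PySem.List.pyRange (-3) 4 1).flatMap fun dx =>
            (PySem.List.pyRange 0 6 1).map fun dy => pvKey (x + dx) (surface_y + dy)))
          (pvKey (x + dx) (surface_y + dy)) = true := by
        refine (PySem.Set.contains_iff _ _).mpr ?_
        rw [PySem.Set.mem_ofList]
        exact List.mem_flatMap.mpr ⟨dx, hdx, List.mem_map.mpr ⟨dy, hdy, rfl⟩⟩
      by_contra hne
      rw [Bool.not_eq_false] at hne
      exact hno (by rw [hne, hreg]; rfl)

-- ===== VERDICT (by name: the statement is the Claim_ definition above) =====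
theorem can_place_fortress_py_spec : Claim_equal_can_place_fortress_py := by
  intro x surface_y blocks _
  exact can_place_fortress_py_eq_alt x surface_y blocks
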